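/-
  SMOKE TEST of the interface start_decoder.F7 → `neighbors` (freeze-7: `neighbors.spec.pre` lost its case `n ≤ 0`; farm report
  CONTRACT-PRE of the unit `neighbors`). Nothing here is used by a proof.

      Floor6.values_le_250     `values ≤ 250` from F7's entry assertion (FL4, FL8, the class clauses): the range of the loop counter `j`
      low_liveIn / hi_liveIn   the dwords `low` = `[R + 80H]`, `hi` = `[R + 90H]` are objects of start_decoder's protected frame
      neighbors_pre_F7         THE PRECONDITION of `neighbors(g->Xlist, j, &low, &hi)` at the call 0x11588e of loop 4026, from the
                               body of F7's entry assertion and what the loop's walk knows of the registers: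
                               `2 ≤ j` (the counter r12d starts at 2: 0x115842) and `j < values` (0x11584e `cmp eax, r12d ; jle` not taken).
                               The new clause `0 < n` is `2 ≤ j`.
-/
import Vorbis.Spec.StartDecoderB
import Vorbis.Spec.PacketRest
namespace Vorbis.Spec.StartDecoder
open X86 X86.User Asan

variable {u₀ : State} {g : Ghost} {A5 : Arena} {A : Arena × List Obj} {v s : State} {i n : Nat} {mc : Int}

/-- **`values ≤ 250` at F7** (FL8 with FL4 and the class clauses of the classes `≤ max_class`): the loop counter `j < values` of loop
4026 is at most 249, so `Xlist[0 .. j]` lies inside the floor element. -/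
theorem Floor6.values_le_250 {mem : Mem} (h : Floor6 g mem i mc n) : Floor1.values mem (floorAt g mem i) ≤ 250 := by
  have h8 := h.FL8
  have h4 := h.base.base.FL4
  have hs : Floor1.dimSum mem (floorAt g mem i) (Floor1.partitions mem (floorAt g mem i))
      ≤ 8 * Floor1.partitions mem (floorAt g mem i) := by
    apply sumTo_le_mul
    intro j hj
    have hp := h.base.base.pcl j hj
    have hlt := h.base.mc_lt
    exact (h.base.classes _ (by omega)).dim.2
  omega

/-- An object of start_decoder's own protected frame is a live object inside the function. -/
theorem ownObj_mem (g : Ghost) (others : List Obj) (o : Obj) (ho : o ∈ Vorbis.Frames.start_decoder.objsAt g.base) :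
    o ∈ stackObjs g.frames' ++ others := by
  unfold Ghost.frames'
  rw [stackObjs_cons]
  exact List.mem_append_left _ (List.mem_append_left _ ho)

/-- `low` (4 bytes at `[R + 80H]` = base + 48) is a live object. -/
theorem low_liveIn (g : Ghost) (others : List Obj) : LiveIn others g.frames' (g.R + 0x80) 4 := by
  refine ⟨⟨g.base + 48, 4, .stack⟩, ownObj_mem g others _ ?_, ?_, ?_⟩
  · unfold FrameLayout.objsAt
    simp only [Vorbis.Frames.start_decoder, List.map_cons, List.mem_cons, true_or]
  · show g.base + 48 ≤ g.R + 0x80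
    unfold Ghost.base
    omega
  · show g.R + 0x80 + 4 ≤ g.base + 48 + 4
    unfold Ghost.base
    omega

/-- `hi` (4 bytes at `[R + 90H]` = base + 64) is a live object. -/
theorem hi_liveIn (g : Ghost) (others : List Obj) : LiveIn others g.frames' (g.R + 0x90) 4 := by
  refine ⟨⟨g.base + 64, 4, .stack⟩, ownObj_mem g others _ ?_, ?_, ?_⟩
  · unfold FrameLayout.objsAt
    simp only [Vorbis.Frames.start_decoder, List.map_cons, List.mem_cons, true_or, or_true]
  · show g.base + 64 ≤ g.R + 0x90
    unfold Ghost.base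
    omega
  · show g.R + 0x90 + 4 ≤ g.base + 64 + 4
    unfold Ghost.base
    omega

/-- **The precondition of `neighbors(g->Xlist, j, &low, &hi)`** (freeze-7 form: `0 < n`, no case `n ≤ 0`) at the call 0x11588e, from
the body of F7's entry assertion at `v` and the state `s` right after the `call` (`rsp = R − 8`; no shadow byte written since `v`):
`rdi = g(i) + 152H` (0x11586d), `esi = j` (0x11588b) with `2 ≤ j < values` (the loop counter), `rdx = R + 80H`, `rcx = R + 90H`.
`Xlist[0 .. j]` lies inside the block of FL2 (an arena block: one live object); `low`, `hi` are stack objects above `800000H − …`,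
the arena block is off the stack (`ArenaOK.blk_off_stack`), so the three ranges are pairwise apart. -/
theorem neighbors_pre_F7 (h : BodyF7 u₀ g i A5 A mc n v) (hrsp : (s.reg .rsp).toNat + 8 = g.R)
    (hun : ShadowUntouched v.mem s.mem) {j : Nat}
    (hrdi : (s.reg .rdi).toNat = floorAt g v.mem i + Off.Floor1.Xlist)
    (hrsi : s32 (s.reg .rsi) = (j : Int)) (hj2 : 2 ≤ j) (hjv : (j : Int) < Floor1.values v.mem (floorAt g v.mem i))
    (hrdx : (s.reg .rdx).toNat = g.R + 0x80) (hrcx : (s.reg .rcx).toNat = g.R + 0x90) :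
    (neighbors.spec A.2 g.frames').pre s := by
  have hf := h.loop.frame
  -- the shadow clause (the same two lines as `shadowPre_call` of StartDecoderBTest.lean)
  have hsh : ShadowPre A.2 g.frames' s := by
    refine ⟨?_, hf.offText⟩
    rw [hrsp]
    exact hf.shadow.untouched hun
  -- `j ≤ 249`
  have hv := Floor6.values_le_250 h.cur
  have hjn : (s32 (s.reg .rsi)).toNat = j := by omega
  -- the block of FL2 is an arena block: ONE live object, off the stack
  have hB : A.1.Blk (floorBlock v.mem g.f) := h.loop.floors.FL2.blk
  have hlive : LiveIn A.2 g.frames' (floorBlock v.mem g.f).base (floorBlock v.mem g.f).size :=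
    liveIn_of_arenaBlk h.loop.mid.arena hB
  have hin := h.loop.floors.toFloorShape.elem_in (IsFloor.of_lt h.cur.base.base.lt)
    (off := Off.Floor1.Xlist) (n := 2 * (j + 1)) (by simp only [voff]; omega)
  have hoff := h.loop.mid.arena.blk_off_stack hB
  obtain ⟨hr1, hr2⟩ := hf.r_eq
  obtain ⟨_, hra2, hra3⟩ := hf.ra
  simp only [Block.contains] at hin
  refine ⟨hsh, by omega, ?_, ?_, ?_, ?_, ?_, ?_⟩
  · rw [hrdi, hjn]
    exact hlive.sub _ _ hin.1 hin.2
  · rw [hrdx]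
    exact low_liveIn g A.2
  · rw [hrcx]
    exact hi_liveIn g A.2
  · rw [hrdi, hrdx, hjn]
    simp only [depth, steady] at hr1 hra2 hra3
    unfold floorAt
    omega
  · rw [hrdi, hrcx, hjn]
    simp only [depth, steady] at hr1 hra2 hra3
    unfold floorAt
    omega
  · rw [hrdx, hrcx]
    omega

end Vorbis.Spec.StartDecoder
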